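-- pv_equiv track=rewrite | github.com/agenisea/artifactor | src/artifactor/outputs/personas.py | _detect_personas
-- ===== SOURCE A (Python) =====
-- _ADMIN_KEYWORDS = {"admin", "manage", "dashboard", "config", "setting"}
--
-- _DEV_KEYWORDS = {"api", "sdk", "webhook", "endpoint", "token"}
--
-- _USER_KEYWORDS = {"login", "register", "profile", "account", "submit"}
--
-- def _detect_personas(
--     entity_names: list[str],
-- ) -> dict[str, list[str]]:
--     """Detect personas from entity name patterns."""
--     personas: dict[str, list[str]] = {}
--     for name in entity_names:
--         lower = name.lower()
--         if any(kw in lower for kw in _ADMIN_KEYWORDS):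
--             personas.setdefault("Administrator", []).append(name)
--         if any(kw in lower for kw in _DEV_KEYWORDS):
--             personas.setdefault("Developer", []).append(name)
--         if any(kw in lower for kw in _USER_KEYWORDS):
--             personas.setdefault("End User", []).append(name)
--     return personas
-- ===== SOURCE B (Python) =====
-- _ADMIN_KEYWORDS = {"admin", "manage", "dashboard", "config", "setting"}
--
-- _DEV_KEYWORDS = {"api", "sdk", "webhook", "endpoint", "token"}
--
-- _USER_KEYWORDS = {"login", "register", "profile", "account", "submit"}
--
--
-- def _detect_personas(
--     entity_names: list[str],
-- ) -> dict[str, list[str]]: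
--     """Detect personas from entity name patterns."""
--     admin = [n for n in entity_names if any(kw in n.lower() for kw in _ADMIN_KEYWORDS)]
--     dev = [n for n in entity_names if any(kw in n.lower() for kw in _DEV_KEYWORDS)]
--     user = [n for n in entity_names if any(kw in n.lower() for kw in _USER_KEYWORDS)]
--     personas: dict[str, list[str]] = {}
--     if admin:
--         personas["Administrator"] = admin
--     if dev:
--         personas["Developer"] = dev
--     if user:
--         personas["End User"] = user
--     return personas
-- ===== Notes on version B (the rewrite author's own statement) =====
-- stated objective: simpler
-- what changed: A builds the dict in one interleaved pass with setdefault+append per category branch; B filters the input once per category with a comprehension and then assembles the dict in fixed category order, inserting only non-empty lists. Pre_ excludes lists on which A's accidental dict-key insertion order (first-match order) differs from B's fixed category order; on those inputs the two dicts are equal as Python dicts but differ as insertion-ordered association lists, and either order is defensible.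
import Mathlib
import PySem

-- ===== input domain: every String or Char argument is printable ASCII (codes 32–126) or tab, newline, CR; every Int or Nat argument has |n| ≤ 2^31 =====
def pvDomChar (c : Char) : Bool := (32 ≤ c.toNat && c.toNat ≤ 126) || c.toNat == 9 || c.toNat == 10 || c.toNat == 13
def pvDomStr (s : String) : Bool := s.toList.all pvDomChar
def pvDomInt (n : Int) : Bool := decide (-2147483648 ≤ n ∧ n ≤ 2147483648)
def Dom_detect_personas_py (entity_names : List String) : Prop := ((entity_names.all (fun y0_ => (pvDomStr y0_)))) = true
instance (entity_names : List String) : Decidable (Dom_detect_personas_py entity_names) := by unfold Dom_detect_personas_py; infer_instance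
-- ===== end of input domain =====

-- B replaces A's single interleaved setdefault pass by one filtering comprehension per category,
-- assembled into the dict in fixed category order (objective: simpler decomposition).

-- ===== PORT A =====
-- Python's keyword SETS are only iterated under `any(...)`, which is order-independent; ported as the literal lists.
def pvAdminKeywords : List String := ["admin", "manage", "dashboard", "config", "setting"]
def pvDevKeywords : List String := ["api", "sdk", "webhook", "endpoint", "token"]
def pvUserKeywords : List String := ["login", "register", "profile", "account", "submit"]

-- `personas.setdefault(k, []).append(name)` = `personas[k] = personas.get(k, []) + [name]` = Dict.modify
def detect_personas_py (entity_names : List String) : List (String × List String) :=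
  (entity_names.foldl (fun personas name =>
      let lower := PySem.Str.lower name
      let personas := if pvAdminKeywords.any (fun kw => PySem.Str.isIn kw lower) then
          PySem.Dict.modify personas "Administrator" [] (fun l => l ++ [name]) else personas
      let personas := if pvDevKeywords.any (fun kw => PySem.Str.isIn kw lower) then
          PySem.Dict.modify personas "Developer" [] (fun l => l ++ [name]) else personas
      let personas := if pvUserKeywords.any (fun kw => PySem.Str.isIn kw lower) then
          PySem.Dict.modify personas "End User" [] (fun l => l ++ [name]) else personas
      personas) PySem.Dict.empty).items

-- ===== PORT B =====
-- `if admin: personas["Administrator"] = admin` : Python truth of a list = non-emptiness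
def detect_personas_py_alt (entity_names : List String) : List (String × List String) :=
  let admin := entity_names.filter (fun n => pvAdminKeywords.any (fun kw => PySem.Str.isIn kw (PySem.Str.lower n)))
  let dev := entity_names.filter (fun n => pvDevKeywords.any (fun kw => PySem.Str.isIn kw (PySem.Str.lower n)))
  let user := entity_names.filter (fun n => pvUserKeywords.any (fun kw => PySem.Str.isIn kw (PySem.Str.lower n)))
  let personas : PySem.Dict String (List String) := PySem.Dict.empty
  let personas := if admin.isEmpty then personas else personas.insert "Administrator" admin
  let personas := if dev.isEmpty then personas else personas.insert "Developer" dev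
  let personas := if user.isEmpty then personas else personas.insert "End User" user
  personas.items

-- ===== PRECONDITION & SPEC =====
def pvMatches (name : String) (keywords : List String) : Bool :=
  keywords.any (fun kw => PySem.Str.isIn kw (PySem.Str.lower name))

def pvCategories : List (String × List String) :=
  [("Administrator", pvAdminKeywords), ("Developer", pvDevKeywords), ("End User", pvUserKeywords)]

-- whether some name of ys matches category c, and the index of the first such name (ys.length if none)
def pvOcc (ys : List String) (c : String × List String) : Bool :=
  ys.any (fun n => pvMatches n c.2)
def pvFIdx (ys : List String) (c : String × List String) : Nat :=
  ys.findIdx (fun n => pvMatches n c.2)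

-- Pre_ excludes lists on which A's accidental dict-key insertion order (first-match order) differs
-- from the fixed category order; there the two dicts are equal as Python dicts (key order ignored)
-- but differ as insertion-ordered association lists, and either key order is defensible.
def Pre_detect_personas_py (entity_names : List String) : Prop :=
  List.Pairwise (fun c c' => pvOcc entity_names c = true → pvOcc entity_names c' = true →
    pvFIdx entity_names c ≤ pvFIdx entity_names c') pvCategories
instance (entity_names : List String) : Decidable (Pre_detect_personas_py entity_names) := by
  unfold Pre_detect_personas_py; infer_instance

def pvWitness_detect_personas_py : List String := ["admin page", "api token"]

def Spec_detect_personas_py (entity_names : List String) (out : List (String × List String)) : Prop := out = detect_personas_py_alt entity_names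
instance (entity_names : List String) (out : List (String × List String)) : Decidable (Spec_detect_personas_py entity_names out) := by unfold Spec_detect_personas_py; infer_instance

-- ===== CLAIM (what is proved, stated in full; the proofs are below) =====
def Claim_equal_detect_personas_py : Prop := ∀ (entity_names : List String), Dom_detect_personas_py entity_names → Pre_detect_personas_py entity_names → Spec_detect_personas_py entity_names (detect_personas_py entity_names)

-- ===== LEMMAS AND PROOFS =====

-- the per-name step of A's fold, restricted to one category
def pvAStep (x : String) (d : PySem.Dict String (List String)) (cat : String × List String) :
    PySem.Dict String (List String) :=
  if pvMatches x cat.2 then PySem.Dict.modify d cat.1 [] (fun l => l ++ [x]) else d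

-- the per-name step of the key-order evolution of A's dict, restricted to one category
def pvOStep (o : List (String × List String)) (x : String) (cat : String × List String) :
    List (String × List String) :=
  if !o.contains cat && pvMatches x cat.2 then o ++ [cat] else o

def pvOrderOf (ys : List String) : List (String × List String) :=
  ys.foldl (fun o name => pvCategories.foldl (fun o cat => pvOStep o name cat) o) []

-- items of a dict whose keys are the labels of `o` and whose values are given by `v`
def pvItemsOf (o : List (String × List String)) (v : (String × List String) → List String) :
    List (String × List String) :=
  o.map (fun c => (c.1, v c))

-- rank of a category in the fixed order, and the strict order "first match earlier, ties by rank"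
def pvRank (c : String × List String) : Nat :=
  if c.1 = "Administrator" then 0 else if c.1 = "Developer" then 1 else 2
def pvLt (ys : List String) (c c' : String × List String) : Prop :=
  pvFIdx ys c < pvFIdx ys c' ∨ (pvFIdx ys c = pvFIdx ys c' ∧ pvRank c < pvRank c')

lemma pvLabelInj : ∀ c ∈ pvCategories, ∀ c' ∈ pvCategories, c.1 = c'.1 → c = c' := by decide

lemma pvItemsOf_congr (o : List (String × List String))
    {v w : (String × List String) → List String} (h : ∀ c ∈ o, v c = w c) :
    pvItemsOf o v = pvItemsOf o w :=
  List.map_congr_left (fun c hc => by rw [h c hc])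

lemma pv_nodup_snoc {α : Type} {l : List α} {a : α} (h : l.Nodup) (ha : a ∉ l) :
    (l ++ [a]).Nodup :=
  ((List.perm_append_singleton a l).nodup_iff).mpr (List.nodup_cons.mpr ⟨ha, h⟩)

-- a category outside `o` has its label outside `o`'s labels (members of `o` drawn from pvCategories)
lemma pv_label_not_mem (o : List (String × List String))
    (hmem : ∀ c ∈ o, c ∈ pvCategories) (c0 : String × List String)
    (hc0 : c0 ∈ pvCategories) (hno : c0 ∉ o) : c0.1 ∉ o.map Prod.fst := by
  intro hl
  rcases List.mem_map.mp hl with ⟨c', hc', he⟩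
  exact hno (by rwa [pvLabelInj c' (hmem c' hc') c0 hc0 he] at hc')

-- find? on an itemsOf-shaped list, key present
lemma pv_find (o : List (String × List String)) (v : (String × List String) → List String)
    (c : String × List String) (hnd : (o.map Prod.fst).Nodup) (hc : c ∈ o) :
    (pvItemsOf o v).find? (fun p => p.1 == c.1) = some (c.1, v c) := by
  induction o with
  | nil => cases hc
  | cons c0 o ih =>
      have hnd0 : (c0.1 :: o.map Prod.fst).Nodup := by simpa using hnd
      have hstep : pvItemsOf (c0 :: o) v = (c0.1, v c0) :: pvItemsOf o v := rfl
      rw [hstep]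
      by_cases he : c0.1 = c.1
      · have hcc : c = c0 := by
          rcases List.mem_cons.mp hc with h | h
          · exact h
          · exfalso
            have h1 : c.1 ∈ o.map Prod.fst := List.mem_map_of_mem (f := Prod.fst) h
            exact (List.nodup_cons.mp hnd0).1 (by rw [he]; exact h1)
        rw [hcc]
        exact List.find?_cons_of_pos (by simp)
      · have hc' : c ∈ o := by
          rcases List.mem_cons.mp hc with h | h
          · exact absurd (by rw [h]) he
          · exact h
        rw [List.find?_cons_of_neg (by simp [he])]
        exact ih (List.nodup_cons.mp hnd0).2 hc'

-- modify on an itemsOf-shaped dict, key present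
lemma pv_modify_mem (o : List (String × List String)) (v : (String × List String) → List String)
    (c : String × List String) (f : List String → List String)
    (hnd : (o.map Prod.fst).Nodup) (hc : c ∈ o) :
    PySem.Dict.modify ⟨pvItemsOf o v⟩ c.1 [] f
      = ⟨pvItemsOf o (fun c' => if c' = c then f (v c) else v c')⟩ := by
  have hinj := List.inj_on_of_nodup_map hnd
  have hcont : (PySem.Dict.contains ⟨pvItemsOf o v⟩ c.1) = true := by
    simp only [PySem.Dict.contains, pvItemsOf, List.any_map, List.any_eq_true]
    exact ⟨c, hc, by simp⟩
  have hget : PySem.Dict.getD ⟨pvItemsOf o v⟩ c.1 [] = v c := by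
    simp [PySem.Dict.getD, PySem.Dict.get?, pv_find o v c hnd hc]
  simp only [PySem.Dict.modify, PySem.Dict.insert, hcont, if_pos, hget]
  congr 1
  simp only [pvItemsOf, List.map_map]
  refine List.map_congr_left (fun c' hc' => ?_)
  by_cases he : c'.1 = c.1
  · have hcc : c' = c := hinj hc' hc he
    rw [hcc]
    simp
  · have hne : c' ≠ c := fun h => he (by rw [h])
    simp [Function.comp, he, hne]

-- modify on an itemsOf-shaped dict, key absent
lemma pv_modify_not_mem (o : List (String × List String)) (v : (String × List String) → List String)
    (c : String × List String) (f : List String → List String)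
    (hl : c.1 ∉ o.map Prod.fst) :
    PySem.Dict.modify ⟨pvItemsOf o v⟩ c.1 [] f
      = ⟨pvItemsOf (o ++ [c]) (fun c' => if c' = c then f [] else v c')⟩ := by
  have hcont : (PySem.Dict.contains ⟨pvItemsOf o v⟩ c.1) = false := by
    simp only [PySem.Dict.contains, pvItemsOf, List.any_map, List.any_eq_false]
    intro c' hc'
    simp only [Function.comp, beq_iff_eq]
    exact fun he => hl (he ▸ List.mem_map_of_mem (f := Prod.fst) hc')
  have hfind : (pvItemsOf o v).find? (fun p => p.1 == c.1) = none := by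
    refine List.find?_eq_none.mpr (fun p hp => ?_)
    rcases List.mem_map.mp hp with ⟨c', hc', he⟩
    rw [← he]
    simp only [beq_iff_eq]
    intro h
    exact hl (h ▸ List.mem_map_of_mem (f := Prod.fst) hc')
  have hget : PySem.Dict.getD ⟨pvItemsOf o v⟩ c.1 [] = [] := by
    simp [PySem.Dict.getD, PySem.Dict.get?, hfind]
  simp only [PySem.Dict.modify, PySem.Dict.insert, hcont, Bool.false_eq_true, if_neg, hget,
    not_false_iff]
  congr 1
  have hco : c ∉ o := fun h => hl (List.mem_map_of_mem (f := Prod.fst) h)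
  have h1 : pvItemsOf (o ++ [c]) (fun c' => if c' = c then f [] else v c')
      = pvItemsOf o (fun c' => if c' = c then f [] else v c') ++ [(c.1, f [])] := by
    simp [pvItemsOf]
  have h2 : pvItemsOf o (fun c' => if c' = c then f [] else v c') = pvItemsOf o v :=
    pvItemsOf_congr o (fun c' hc' => by
      have hne : c' ≠ c := fun h => hco (h ▸ hc')
      simp [hne])
  rw [h1, h2]

-- order fold: membership is monotone
lemma pvFoldO_mono (x : String) (cs : List (String × List String)) :
    ∀ (o : List (String × List String)) (c : String × List String), c ∈ o →
      c ∈ cs.foldl (fun o cat => pvOStep o x cat) o := by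
  induction cs with
  | nil => intro o c h; exact h
  | cons c0 cs ih =>
      intro o c h
      refine ih _ c ?_
      simp only [pvOStep]
      split
      · exact List.mem_append_left _ h
      · exact h

-- order fold: a matched category ends up in the order
lemma pvFoldO_match_mem (x : String) (cs : List (String × List String)) :
    ∀ (o : List (String × List String)) (c : String × List String), c ∈ cs →
      pvMatches x c.2 = true → c ∈ cs.foldl (fun o cat => pvOStep o x cat) o := by
  induction cs with
  | nil => intro o c h; cases h
  | cons c0 cs ih =>
      intro o c h hm
      rcases List.mem_cons.mp h with h | h
      · have hm0 : pvMatches x c0.2 = true := by rw [← h]; exact hm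
        simp only [List.foldl_cons]
        refine pvFoldO_mono x cs _ c ?_
        by_cases hco : c0 ∈ o
        · have hct : o.contains c0 = true := List.contains_iff_mem.mpr hco
          have hid : pvOStep o x c0 = o := by
            unfold pvOStep
            rw [hct]
            simp
          rw [hid, h]
          exact hco
        · have hcf : o.contains c0 = false := by simp [hco]
          have happ : pvOStep o x c0 = o ++ [c0] := by
            unfold pvOStep
            rw [hcf, hm0]
            simp
          rw [happ, h]
          exact List.mem_append_right _ (by simp)
      · exact ih _ c h hm

-- order fold: all members come from o or cs
lemma pvFoldO_subset (x : String) (cs : List (String × List String)) :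
    ∀ (o : List (String × List String)) (c : String × List String),
      c ∈ cs.foldl (fun o cat => pvOStep o x cat) o → c ∈ o ∨ c ∈ cs := by
  induction cs with
  | nil => intro o c h; exact Or.inl h
  | cons c0 cs ih =>
      intro o c h
      rcases ih _ c h with h' | h'
      · simp only [pvOStep] at h'
        split at h'
        · rcases List.mem_append.mp h' with h'' | h''
          · exact Or.inl h''
          · exact Or.inr (by simp [List.mem_singleton.mp h''])
        · exact Or.inl h'
      · exact Or.inr (List.mem_cons_of_mem _ h')

-- order fold: label-nodup and pvCategories-membership are preserved
lemma pvFoldO_nodup (x : String) (cs : List (String × List String))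
    (hcs : ∀ c ∈ cs, c ∈ pvCategories) :
    ∀ (o : List (String × List String)), (∀ c ∈ o, c ∈ pvCategories) →
      (o.map Prod.fst).Nodup →
      ((cs.foldl (fun o cat => pvOStep o x cat) o).map Prod.fst).Nodup ∧
      (∀ c ∈ cs.foldl (fun o cat => pvOStep o x cat) o, c ∈ pvCategories) := by
  induction cs with
  | nil => intro o hmem hnd; exact ⟨hnd, hmem⟩
  | cons c0 cs ih =>
      intro o hmem hnd
      have hc0 : c0 ∈ pvCategories := hcs c0 (by simp)
      have hcs' : ∀ c ∈ cs, c ∈ pvCategories := fun c hc => hcs c (List.mem_cons_of_mem _ hc)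
      refine ih hcs' _ ?_ ?_
      · intro c hc
        simp only [pvOStep] at hc
        split at hc
        · rcases List.mem_append.mp hc with h | h
          · exact hmem c h
          · rw [List.mem_singleton.mp h]; exact hc0
        · exact hmem c hc
      · simp only [pvOStep]
        split
        · rename_i hcond
          have hc0o : c0 ∉ o := by
            intro hmemc
            rw [List.contains_iff_mem.mpr hmemc] at hcond
            simp at hcond
          have hl : c0.1 ∉ o.map Prod.fst := pv_label_not_mem o hmem c0 hc0 hc0o
          rw [List.map_append]
          exact pv_nodup_snoc hnd (by simpa using hl)
        · exact hnd

-- the inner per-name lemma: A's per-category step sequence tracks the order step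
lemma pv_inner (x : String) :
    ∀ (cs : List (String × List String)), (∀ c ∈ cs, c ∈ pvCategories) → cs.Nodup →
    ∀ (o : List (String × List String)) (v : (String × List String) → List String),
      (∀ c ∈ o, c ∈ pvCategories) → (o.map Prod.fst).Nodup →
      (∀ c ∈ cs, c ∉ o → v c = []) →
      (cs.foldl (fun d cat => pvAStep x d cat) ⟨pvItemsOf o v⟩).items
        = pvItemsOf (cs.foldl (fun o cat => pvOStep o x cat) o)
            (fun c => v c ++ if c ∈ cs ∧ pvMatches x c.2 = true then [x] else []) := by
  intro cs
  induction cs with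
  | nil =>
      intro _ _ o v _ _ _
      simp only [List.foldl_nil]
      exact (pvItemsOf_congr o (fun c _ => by simp)).symm
  | cons c0 cs ih =>
      intro hcs hndcs o v hmem hnd hv
      have hc0 : c0 ∈ pvCategories := hcs c0 (by simp)
      have hcs' : ∀ c ∈ cs, c ∈ pvCategories := fun c hc => hcs c (List.mem_cons_of_mem _ hc)
      have hc0cs : c0 ∉ cs := (List.nodup_cons.mp hndcs).1
      have hndcs' : cs.Nodup := (List.nodup_cons.mp hndcs).2
      simp only [List.foldl_cons]
      by_cases hm : pvMatches x c0.2 = true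
      · by_cases hc0o : c0 ∈ o
        · -- matched, already in the order: in-place append, order unchanged
          have hstep : pvAStep x ⟨pvItemsOf o v⟩ c0
              = ⟨pvItemsOf o (fun c' => if c' = c0 then v c0 ++ [x] else v c')⟩ := by
            simp only [pvAStep, hm, if_pos]
            exact pv_modify_mem o v c0 _ hnd hc0o
          have hostep : pvOStep o x c0 = o := by
            have hct : o.contains c0 = true := List.contains_iff_mem.mpr hc0o
            unfold pvOStep
            rw [hct]
            simp
          rw [hstep, hostep,
            ih hcs' hndcs' o _ hmem hnd
              (fun c hc hco => by
                have hne : c ≠ c0 := fun h => hco (h ▸ hc0o)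
                rw [if_neg hne]
                exact hv c (List.mem_cons_of_mem _ hc) hco)]
          refine pvItemsOf_congr _ (fun c _ => ?_)
          by_cases he : c = c0
          · simp [he, hc0cs, hm]
          · simp [he, List.mem_cons]
        · -- matched, new: appended at the end of both dict and order
          have hl : c0.1 ∉ o.map Prod.fst := pv_label_not_mem o hmem c0 hc0 hc0o
          have hstep : pvAStep x ⟨pvItemsOf o v⟩ c0
              = ⟨pvItemsOf (o ++ [c0]) (fun c' => if c' = c0 then [] ++ [x] else v c')⟩ := by
            simp only [pvAStep, hm, if_pos]
            exact pv_modify_not_mem o v c0 _ hl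
          have hcf : o.contains c0 = false := by simp [hc0o]
          have hostep : pvOStep o x c0 = o ++ [c0] := by
            unfold pvOStep
            rw [hcf, hm]
            simp
          have hmem' : ∀ c ∈ o ++ [c0], c ∈ pvCategories := by
            intro c hc
            rcases List.mem_append.mp hc with h | h
            · exact hmem c h
            · rw [List.mem_singleton.mp h]; exact hc0
          have hnd' : ((o ++ [c0]).map Prod.fst).Nodup := by
            rw [List.map_append]
            exact pv_nodup_snoc hnd (by simpa using hl)
          have hv' : ∀ c ∈ cs, c ∉ o ++ [c0] →
              (fun c' => if c' = c0 then [] ++ [x] else v c') c = [] := by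
            intro c hc hco
            have hne : c ≠ c0 := fun h => hco (h ▸ List.mem_append_right _ (by simp))
            have hcno : c ∉ o := fun h => hco (List.mem_append_left _ h)
            simp only [hne, if_false]
            exact hv c (List.mem_cons_of_mem _ hc) hcno
          rw [hstep, hostep, ih hcs' hndcs' (o ++ [c0]) _ hmem' hnd' hv']
          refine pvItemsOf_congr _ (fun c _ => ?_)
          by_cases he : c = c0
          · simp [he, hc0cs, hm, hv c0 (by simp) hc0o]
          · simp [he, List.mem_cons]
      · -- unmatched: both steps are the identity
        have hstep : pvAStep x ⟨pvItemsOf o v⟩ c0 = ⟨pvItemsOf o v⟩ := by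
          simp [pvAStep, hm]
        have hostep : pvOStep o x c0 = o := by
          simp [pvOStep, hm]
        rw [hstep, hostep,
          ih hcs' hndcs' o v hmem hnd
            (fun c hc hco => hv c (List.mem_cons_of_mem _ hc) hco)]
        refine pvItemsOf_congr _ (fun c _ => ?_)
        by_cases he : c = c0
        · simp [he, hm]
        · simp [he, List.mem_cons]

-- A's full per-name step is the fold of pvAStep over the category table
lemma pvAStep_three (x : String) (d : PySem.Dict String (List String)) :
    (let lower := PySem.Str.lower x
     let d1 := if pvAdminKeywords.any (fun kw => PySem.Str.isIn kw lower) then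
         PySem.Dict.modify d "Administrator" [] (fun l => l ++ [x]) else d
     let d2 := if pvDevKeywords.any (fun kw => PySem.Str.isIn kw lower) then
         PySem.Dict.modify d1 "Developer" [] (fun l => l ++ [x]) else d1
     let d3 := if pvUserKeywords.any (fun kw => PySem.Str.isIn kw lower) then
         PySem.Dict.modify d2 "End User" [] (fun l => l ++ [x]) else d2
     d3)
      = pvCategories.foldl (fun d cat => pvAStep x d cat) d := rfl

-- A's fold result, characterized: keys in first-match order, values the per-category filters
lemma pv_outer (ys : List String) :
    (ys.foldl (fun personas name =>
      let lower := PySem.Str.lower name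
      let personas := if pvAdminKeywords.any (fun kw => PySem.Str.isIn kw lower) then
          PySem.Dict.modify personas "Administrator" [] (fun l => l ++ [name]) else personas
      let personas := if pvDevKeywords.any (fun kw => PySem.Str.isIn kw lower) then
          PySem.Dict.modify personas "Developer" [] (fun l => l ++ [name]) else personas
      let personas := if pvUserKeywords.any (fun kw => PySem.Str.isIn kw lower) then
          PySem.Dict.modify personas "End User" [] (fun l => l ++ [name]) else personas
      personas) PySem.Dict.empty).items
      = pvItemsOf (pvOrderOf ys) (fun c => ys.filter (fun n => pvMatches n c.2)) ∧
    (∀ c ∈ pvOrderOf ys, c ∈ pvCategories) ∧ ((pvOrderOf ys).map Prod.fst).Nodup ∧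
    (∀ c ∈ pvCategories, c ∉ pvOrderOf ys → ys.filter (fun n => pvMatches n c.2) = []) := by
  induction ys using List.reverseRecOn with
  | nil =>
      refine ⟨rfl, ?_, ?_, ?_⟩ <;> simp [pvOrderOf]
  | append_singleton ys x ihy =>
      obtain ⟨hA, hmem, hnd, hfilt⟩ := ihy
      have horder : pvOrderOf (ys ++ [x])
          = pvCategories.foldl (fun o cat => pvOStep o x cat) (pvOrderOf ys) := by
        simp [pvOrderOf, List.foldl_append]
      have hcats : ∀ c ∈ pvCategories, c ∈ pvCategories := fun c hc => hc
      have hndcats : pvCategories.Nodup := by decide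
      have hDict : (ys.foldl (fun personas name =>
          let lower := PySem.Str.lower name
          let personas := if pvAdminKeywords.any (fun kw => PySem.Str.isIn kw lower) then
              PySem.Dict.modify personas "Administrator" [] (fun l => l ++ [name]) else personas
          let personas := if pvDevKeywords.any (fun kw => PySem.Str.isIn kw lower) then
              PySem.Dict.modify personas "Developer" [] (fun l => l ++ [name]) else personas
          let personas := if pvUserKeywords.any (fun kw => PySem.Str.isIn kw lower) then
              PySem.Dict.modify personas "End User" [] (fun l => l ++ [name]) else personas
          personas) PySem.Dict.empty)
          = ⟨pvItemsOf (pvOrderOf ys) (fun c => ys.filter (fun n => pvMatches n c.2))⟩ := by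
        rw [← hA]
      refine ⟨?_, ?_, ?_, ?_⟩
      · rw [List.foldl_append, List.foldl_cons, List.foldl_nil, hDict, pvAStep_three,
          pv_inner x pvCategories hcats hndcats _ _ hmem hnd hfilt, horder]
        refine pvItemsOf_congr _ (fun c hc => ?_)
        have hcmem : c ∈ pvCategories := by
          rcases pvFoldO_subset x pvCategories _ c hc with h | h
          · exact hmem c h
          · exact h
        by_cases hmx : pvMatches x c.2 = true
        · simp [List.filter_append, hcmem, hmx]
        · simp [List.filter_append, hmx]
      · rw [horder]
        exact (pvFoldO_nodup x pvCategories hcats _ hmem hnd).2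
      · rw [horder]
        exact (pvFoldO_nodup x pvCategories hcats _ hmem hnd).1
      · intro c hc hno
        rw [horder] at hno
        have hnoys : c ∉ pvOrderOf ys := fun h => hno (pvFoldO_mono x pvCategories _ c h)
        have hnm : pvMatches x c.2 ≠ true := fun hmx =>
          hno (pvFoldO_match_mem x pvCategories _ c hc hmx)
        simp [List.filter_append, hfilt c hc hnoys, hnm]

lemma pv_and_true {a b : Bool} (h : (a && b) = true) : a = true ∧ b = true := by
  cases a <;> cases b <;> simp_all

-- the inner order fold appends exactly the new matching categories, in table order
lemma pvFoldO_eq (x : String) :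
    ∀ (cs : List (String × List String)), cs.Nodup →
    ∀ (o : List (String × List String)),
      cs.foldl (fun o cat => pvOStep o x cat) o
        = o ++ cs.filter (fun c => !o.contains c && pvMatches x c.2) := by
  intro cs
  induction cs with
  | nil => intro _ o; simp
  | cons c0 cs ih =>
      intro hnd o
      have hc0cs : c0 ∉ cs := (List.nodup_cons.mp hnd).1
      have hnd' : cs.Nodup := (List.nodup_cons.mp hnd).2
      rw [List.foldl_cons, List.filter_cons]
      by_cases hb : (!o.contains c0 && pvMatches x c0.2) = true
      · rw [if_pos hb]
        have hstep : pvOStep o x c0 = o ++ [c0] := by unfold pvOStep; rw [if_pos hb]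
        rw [hstep, ih hnd' (o ++ [c0])]
        have hfe : cs.filter (fun c => !(o ++ [c0]).contains c && pvMatches x c.2)
            = cs.filter (fun c => !o.contains c && pvMatches x c.2) := by
          refine List.filter_congr (fun c hc => ?_)
          have hne : c ≠ c0 := fun h => hc0cs (h ▸ hc)
          have : (o ++ [c0]).contains c = o.contains c := by
            simp [List.contains_iff_mem, hne]
          rw [this]
        rw [hfe]
        simp
      · rw [if_neg hb]
        have hstep : pvOStep o x c0 = o := by unfold pvOStep; rw [if_neg hb]
        rw [hstep, ih hnd' o]

lemma pvOrderOf_append (ys : List String) (x : String) :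
    pvOrderOf (ys ++ [x])
      = pvOrderOf ys
        ++ pvCategories.filter (fun c => !(pvOrderOf ys).contains c && pvMatches x c.2) := by
  have h : pvOrderOf (ys ++ [x])
      = pvCategories.foldl (fun o cat => pvOStep o x cat) (pvOrderOf ys) := by
    simp [pvOrderOf, List.foldl_append]
  rw [h, pvFoldO_eq x pvCategories (by decide) (pvOrderOf ys)]

-- membership in A's key order = occurrence of the category
lemma pvOrder_mem (ys : List String) :
    ∀ c ∈ pvCategories, (c ∈ pvOrderOf ys ↔ pvOcc ys c = true) := by
  induction ys using List.reverseRecOn with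
  | nil => intro c _; simp [pvOrderOf, pvOcc]
  | append_singleton ys x ih =>
      intro c hc
      rw [pvOrderOf_append]
      have hocc : pvOcc (ys ++ [x]) c = (pvOcc ys c || pvMatches x c.2) := by
        simp [pvOcc, List.any_append]
      rw [hocc]
      by_cases h : pvOcc ys c = true
      · have hm : c ∈ pvOrderOf ys := (ih c hc).mpr h
        simp [List.mem_append, hm, h]
      · have hm : c ∉ pvOrderOf ys := fun hmm => h ((ih c hc).mp hmm)
        have hcont : (pvOrderOf ys).contains c = false := by
          simp [List.contains_iff_mem, hm]
        simp [List.mem_append, hm, List.mem_filter, hc, hcont, h]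

-- first-match index facts
lemma pvFIdx_lt_of_occ (ys : List String) (c : String × List String)
    (h : pvOcc ys c = true) : pvFIdx ys c < ys.length := by
  rcases List.any_eq_true.mp h with ⟨a, ha, hp⟩
  exact List.findIdx_lt_length.mpr ⟨a, ha, hp⟩

lemma pvFIdx_eq_of_not_occ (ys : List String) (c : String × List String)
    (h : pvOcc ys c = false) : pvFIdx ys c = ys.length :=
  List.findIdx_eq_length.mpr (fun a ha => by simpa using List.any_eq_false.mp h a ha)

lemma pvFIdx_append_occ (ys : List String) (x : String) (c : String × List String)
    (h : pvOcc ys c = true) : pvFIdx (ys ++ [x]) c = pvFIdx ys c := by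
  have hlt : List.findIdx (fun n => pvMatches n c.2) ys < ys.length := pvFIdx_lt_of_occ ys c h
  unfold pvFIdx
  rw [List.findIdx_append, if_pos hlt]

lemma pvFIdx_append_new (ys : List String) (x : String) (c : String × List String)
    (h : pvOcc ys c = false) (hm : pvMatches x c.2 = true) :
    pvFIdx (ys ++ [x]) c = ys.length := by
  have hEq : List.findIdx (fun n => pvMatches n c.2) ys = ys.length := pvFIdx_eq_of_not_occ ys c h
  unfold pvFIdx
  rw [List.findIdx_append, if_neg (by omega)]
  simp [List.findIdx_cons, hm]

-- A's key order is sorted by (first-match index, fixed-category rank)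
lemma pv_not_mem_of_filter_cond (ys : List String) (a : String × List String)
    (h : (!(pvOrderOf ys).contains a && pvMatches x a.2) = true) : a ∉ pvOrderOf ys := by
  intro hmm
  have h1 := (pv_and_true h).1
  rw [List.contains_iff_mem.mpr hmm] at h1
  simp at h1

lemma pv_not_occ_of_not_mem (ys : List String) (a : String × List String)
    (ha : a ∈ pvCategories) (h : a ∉ pvOrderOf ys) : pvOcc ys a = false := by
  cases hc : pvOcc ys a
  · rfl
  · exact absurd ((pvOrder_mem ys a ha).mpr hc) h

lemma pvOrder_pairwise (ys : List String) : (pvOrderOf ys).Pairwise (pvLt ys) := by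
  induction ys using List.reverseRecOn with
  | nil => simp [pvOrderOf]
  | append_singleton ys x ih =>
      have hmem : ∀ c ∈ pvOrderOf ys, c ∈ pvCategories := (pv_outer ys).2.1
      rw [pvOrderOf_append]
      refine List.pairwise_append.mpr ⟨?_, ?_, ?_⟩
      · refine List.Pairwise.imp_of_mem (fun {a b} ha hb hr => ?_) ih
        have hoa : pvOcc ys a = true := (pvOrder_mem ys a (hmem a ha)).mp ha
        have hob : pvOcc ys b = true := (pvOrder_mem ys b (hmem b hb)).mp hb
        unfold pvLt at hr ⊢
        rw [pvFIdx_append_occ ys x a hoa, pvFIdx_append_occ ys x b hob]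
        exact hr
      · have hrank : pvCategories.Pairwise (fun c c' => pvRank c < pvRank c') := by decide
        refine List.Pairwise.imp_of_mem (fun {a b} ha hb hr => ?_) (hrank.filter _)
        have ha' := List.mem_filter.mp ha
        have hb' := List.mem_filter.mp hb
        have hna : a ∉ pvOrderOf ys := pv_not_mem_of_filter_cond ys a ha'.2
        have hnb : b ∉ pvOrderOf ys := pv_not_mem_of_filter_cond ys b hb'.2
        have hoa : pvOcc ys a = false := pv_not_occ_of_not_mem ys a ha'.1 hna
        have hob : pvOcc ys b = false := pv_not_occ_of_not_mem ys b hb'.1 hnb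
        have hma : pvMatches x a.2 = true := (pv_and_true ha'.2).2
        have hmb : pvMatches x b.2 = true := (pv_and_true hb'.2).2
        unfold pvLt
        rw [pvFIdx_append_new ys x a hoa hma, pvFIdx_append_new ys x b hob hmb]
        exact Or.inr ⟨rfl, hr⟩
      · intro a ha b hb
        have hoa : pvOcc ys a = true := (pvOrder_mem ys a (hmem a ha)).mp ha
        have hb' := List.mem_filter.mp hb
        have hnb : b ∉ pvOrderOf ys := pv_not_mem_of_filter_cond ys b hb'.2
        have hob : pvOcc ys b = false := pv_not_occ_of_not_mem ys b hb'.1 hnb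
        have hmb : pvMatches x b.2 = true := (pv_and_true hb'.2).2
        unfold pvLt
        rw [pvFIdx_append_occ ys x a hoa, pvFIdx_append_new ys x b hob hmb]
        exact Or.inl (pvFIdx_lt_of_occ ys a hoa)

lemma pvLt_asym (ys : List String) (a b : String × List String) :
    pvLt ys a b → pvLt ys b a → False := by
  unfold pvLt
  rintro (h1 | ⟨h1, h1'⟩) (h2 | ⟨h2, h2'⟩) <;> omega

-- two lists sorted by an asymmetric relation and permutation-equal are equal
lemma pv_sorted_eq {α : Type} {r : α → α → Prop}
    (hasym : ∀ a b, r a b → r b a → False) :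
    ∀ (l₁ l₂ : List α), l₁.Perm l₂ → l₁.Pairwise r → l₂.Pairwise r → l₁ = l₂ := by
  intro l₁
  induction l₁ with
  | nil =>
      intro l₂ hp _ _
      exact (List.Perm.nil_eq hp)
  | cons a t ih =>
      intro l₂ hp h₁ h₂
      cases l₂ with
      | nil => exact absurd hp.symm (by simp)
      | cons b t₂ =>
          have hab : a = b := by
            by_contra hne
            have ha : a ∈ b :: t₂ := hp.mem_iff.mp (by simp)
            have hb : b ∈ a :: t := hp.mem_iff.mpr (by simp)
            have ha' : a ∈ t₂ := by
              rcases List.mem_cons.mp ha with h | h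
              · exact absurd h hne
              · exact h
            have hb' : b ∈ t := by
              rcases List.mem_cons.mp hb with h | h
              · exact absurd h.symm hne
              · exact h
            exact hasym a b ((List.pairwise_cons.mp h₁).1 b hb')
              ((List.pairwise_cons.mp h₂).1 a ha')
          subst hab
          have hp' : t.Perm t₂ := hp.cons_inv
          rw [ih t₂ hp' (List.pairwise_cons.mp h₁).2 (List.pairwise_cons.mp h₂).2]

-- under Pre_, the occurring categories in fixed order are also sorted by (first index, rank)
lemma pv_filter_sorted (ys : List String) (h : Pre_detect_personas_py ys) :
    (pvCategories.filter (fun c => pvOcc ys c)).Pairwise (pvLt ys) := by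
  have hrank : pvCategories.Pairwise (fun c c' => pvRank c < pvRank c') := by decide
  unfold Pre_detect_personas_py at h
  have hboth := (h.and hrank).filter (fun c => pvOcc ys c)
  refine List.Pairwise.imp_of_mem (fun {a b} ha hb hr => ?_) hboth
  have hoa : pvOcc ys a = true := by simpa using (List.mem_filter.mp ha).2
  have hob : pvOcc ys b = true := by simpa using (List.mem_filter.mp hb).2
  have hle : pvFIdx ys a ≤ pvFIdx ys b := hr.1 hoa hob
  rcases Nat.lt_or_ge (pvFIdx ys a) (pvFIdx ys b) with hlt | hge
  · exact Or.inl hlt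
  · exact Or.inr ⟨Nat.le_antisymm hle hge, hr.2⟩

-- (ys.filter p).isEmpty = !ys.any p
lemma pv_isEmpty_filter (p : String → Bool) (ys : List String) :
    (ys.filter p).isEmpty = !ys.any p := by
  cases h : ys.any p
  · simp only [Bool.not_false, List.isEmpty_iff, List.filter_eq_nil_iff]
    intro a ha
    simp [List.any_eq_false.mp h a ha]
  · rcases List.any_eq_true.mp h with ⟨a, ha, hp⟩
    have hmemf : a ∈ ys.filter p := List.mem_filter.mpr ⟨ha, hp⟩
    have hne : ys.filter p ≠ [] := fun he => by rw [he] at hmemf; cases hmemf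
    cases hf : ys.filter p with
    | nil => exact absurd hf hne
    | cons b t => simp

-- B's items, characterized: occurring categories in fixed order, values the per-category filters
lemma pvB_items (ys : List String) :
    detect_personas_py_alt ys
      = pvItemsOf (pvCategories.filter (fun c => pvOcc ys c))
          (fun c => ys.filter (fun n => pvMatches n c.2)) := by
  unfold detect_personas_py_alt
  simp only [pv_isEmpty_filter, pvItemsOf, pvOcc, pvMatches, pvCategories,
    List.filter_cons, List.filter_nil]
  cases h1 : ys.any (fun n => pvAdminKeywords.any (fun kw => PySem.Str.isIn kw (PySem.Str.lower n))) <;>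
    cases h2 : ys.any (fun n => pvDevKeywords.any (fun kw => PySem.Str.isIn kw (PySem.Str.lower n))) <;>
      cases h3 : ys.any (fun n => pvUserKeywords.any (fun kw => PySem.Str.isIn kw (PySem.Str.lower n))) <;>
        rfl

-- ===== VERDICT (by name: the statement is the Claim_ definition above) =====
theorem detect_personas_py_spec : Claim_equal_detect_personas_py := by
  intro entity_names _ hpre
  unfold Spec_detect_personas_py detect_personas_py
  obtain ⟨hA, hmem, hnd, _⟩ := pv_outer entity_names
  rw [hA, pvB_items]
  have hnd1 : (pvOrderOf entity_names).Nodup := hnd.of_map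
  have hnd2 : (pvCategories.filter (fun c => pvOcc entity_names c)).Nodup :=
    (by decide : pvCategories.Nodup).filter _
  have hiff : ∀ a, a ∈ pvOrderOf entity_names
      ↔ a ∈ pvCategories.filter (fun c => pvOcc entity_names c) := by
    intro a
    constructor
    · intro ha
      exact List.mem_filter.mpr ⟨hmem a ha, by
        simpa using (pvOrder_mem entity_names a (hmem a ha)).mp ha⟩
    · intro ha
      have ha' := List.mem_filter.mp ha
      exact (pvOrder_mem entity_names a ha'.1).mpr (by simpa using ha'.2)
  have hperm : (pvOrderOf entity_names).Perm
      (pvCategories.filter (fun c => pvOcc entity_names c)) :=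
    (List.perm_ext_iff_of_nodup hnd1 hnd2).mpr hiff
  rw [pv_sorted_eq (pvLt_asym entity_names) _ _ hperm (pvOrder_pairwise entity_names)
    (pv_filter_sorted entity_names hpre)]
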